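-- pv_equiv track=rewrite | github.com/zhozheka/TechnoSphere | search/search-index/qtree.py | find_lowest_prio
-- ===== SOURCE A (Python) =====
-- def get_operator_prio(s):
--     if s == '|':
--         return 0
--     if s == '&':
--         return 1
--     if s == '!':
--         return 2
--
--     return None
--
-- def is_operator(s):
--     return get_operator_prio(s) is not None
--
-- def find_lowest_prio(tokens):
--     fold = 0
--     cur_lowest_prio = 99
--     cur_lowest_prio_n = -1
--     cur_lowest_prio_f = 0
--
--     for j, t in enumerate(tokens[::-1]):
--         if t == ')':
--             fold += 1
--
--         elif t == '(':
--             fold -= 1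
--
--         if fold < 0:
--             raise Exception('brackets error')
--
--         if is_operator(t):
--             if (get_operator_prio(t) < cur_lowest_prio) and (fold <= cur_lowest_prio_f):
--                 cur_lowest_prio_f = fold
--                 cur_lowest_prio_n = j
--                 cur_lowest_prio = get_operator_prio(t)
--
--     if fold != 0:
--         raise Exception('brackets error')
--
--     token_num = len(tokens) - cur_lowest_prio_n - 1
--     return token_num
-- ===== SOURCE B (Python) =====
-- def get_operator_prio(s):
--     if s == '|':
--         return 0
--     if s == '&':
--         return 1
--     if s == '!':
--         return 2
--     return None
--
--
-- def find_lowest_prio(tokens):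
--     depth = 0
--     candidates = []
--     for i, t in enumerate(tokens):
--         if t == '(':
--             depth += 1
--         elif t == ')':
--             depth -= 1
--             if depth < 0:
--                 raise Exception('brackets error')
--         else:
--             p = get_operator_prio(t)
--             if p is not None and depth == 0:
--                 candidates.append((i, p))
--     if depth != 0:
--         raise Exception('brackets error')
--     if not candidates:
--         return len(tokens)
--     return min(candidates, key=lambda c: (c[1], -c[0]))[0]
-- ===== Notes on version B (the rewrite author's own statement) =====
-- stated objective: simpler
-- what changed: Replaces A's reverse scan with a four-field best-so-far state (and the fold<=cur_lowest_prio_f subtlety) by a plain forward pass that collects depth-0 operator candidates and then takes min(candidates, key=(prio, -index)).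
import Mathlib
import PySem

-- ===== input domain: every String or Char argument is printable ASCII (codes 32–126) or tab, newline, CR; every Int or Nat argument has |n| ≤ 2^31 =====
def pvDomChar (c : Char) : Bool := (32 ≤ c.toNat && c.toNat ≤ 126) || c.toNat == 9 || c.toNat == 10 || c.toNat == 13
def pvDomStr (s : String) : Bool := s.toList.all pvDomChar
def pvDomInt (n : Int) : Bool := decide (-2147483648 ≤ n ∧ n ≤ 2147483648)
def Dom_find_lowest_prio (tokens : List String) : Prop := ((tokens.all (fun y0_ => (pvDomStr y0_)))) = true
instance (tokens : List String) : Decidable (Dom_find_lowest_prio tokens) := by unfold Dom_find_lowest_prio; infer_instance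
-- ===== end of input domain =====

-- B replaces A's reverse scan with a four-field best-so-far state by a forward pass collecting
-- depth-0 operator candidates followed by min(candidates, key=(prio, -index)); objective: simpler.

-- ===== PORT A =====
-- helper shared by both Python files
def get_operator_prio (s : String) : Option Int :=
  if s == "|" then some 0
  else if s == "&" then some 1
  else if s == "!" then some 2
  else none

def is_operator (s : String) : Bool := (get_operator_prio s).isSome

-- loop body of A; state none = Python raised Exception('brackets error')
-- state: (fold, cur_lowest_prio, cur_lowest_prio_n, cur_lowest_prio_f)
def stepA (st : Option (Int × Int × Int × Int)) (jt : Int × String) :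
    Option (Int × Int × Int × Int) :=
  match st with
  | none => none
  | some (fold, clp, clpn, clpf) =>
    let fold := if jt.2 == ")" then fold + 1 else if jt.2 == "(" then fold - 1 else fold
    if fold < 0 then none
    else if is_operator jt.2 then
      match get_operator_prio jt.2 with
      | some p =>
        if p < clp ∧ fold ≤ clpf then some (fold, p, jt.1, fold)
        else some (fold, clp, clpn, clpf)
      | none => some (fold, clp, clpn, clpf)
    else some (fold, clp, clpn, clpf)

def find_lowest_prio (tokens : List String) : Int :=
  -- for j, t in enumerate(tokens[::-1]): …   (tokens[::-1] is the full reverse slice)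
  let st := (PySem.List.enumerate tokens.reverse).foldl stepA (some (0, 99, -1, 0))
  match st with
  | none => 0  -- Python raised 'brackets error' inside the loop; unreachable under Pre_
  | some (fold, _, clpn, _) =>
    if fold ≠ 0 then 0  -- Python raised 'brackets error' after the loop; unreachable under Pre_
    else (tokens.length : Int) - clpn - 1

-- ===== PORT B =====
-- loop body of B; state none = Python raised Exception('brackets error')
-- state: (depth, candidates)
def stepB (st : Option (Int × List (Int × Int))) (it : Int × String) :
    Option (Int × List (Int × Int)) :=
  match st with
  | none => none
  | some (depth, cands) =>
    if it.2 == "(" then some (depth + 1, cands)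
    else if it.2 == ")" then
      if depth - 1 < 0 then none else some (depth - 1, cands)
    else
      match get_operator_prio it.2 with
      | some p => if depth = 0 then some (depth, cands ++ [(it.1, p)]) else some (depth, cands)
      | none => some (depth, cands)

def find_lowest_prio_alt (tokens : List String) : Int :=
  let st := (PySem.List.enumerate tokens).foldl stepB (some (0, []))
  match st with
  | none => 0  -- Python raised 'brackets error' inside the loop; unreachable under Pre_
  | some (depth, cands) =>
    if depth ≠ 0 then 0  -- Python raised 'brackets error' after the loop; unreachable under Pre_
    else
      match PySem.List.min2? cands (fun c => c.2) (fun c => -c.1) with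
      | none => (tokens.length : Int)
      | some c => c.1

-- ===== PRECONDITION & SPEC =====
-- bracket balance of a token list: #'(' - #')'
def pvBal (l : List String) : Int := (l.count "(" : Int) - (l.count ")" : Int)

-- Pre_ excludes exactly the inputs on which the Python A raises Exception('brackets error'):
-- token lists whose brackets are not balanced (some prefix closes more than it opens, or the
-- totals differ).  B raises there too.
def Pre_find_lowest_prio (tokens : List String) : Prop :=
  (∀ i : Nat, i < tokens.length + 1 → 0 ≤ pvBal (tokens.take i)) ∧ pvBal tokens = 0
instance (tokens : List String) : Decidable (Pre_find_lowest_prio tokens) := by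
  unfold Pre_find_lowest_prio; infer_instance

def pvWitness_find_lowest_prio : List String := ["a", "&", "(", "b", "|", "c", ")"]

def Spec_find_lowest_prio (tokens : List String) (out : Int) : Prop := out = find_lowest_prio_alt tokens
instance (tokens : List String) (out : Int) : Decidable (Spec_find_lowest_prio tokens out) := by
  unfold Spec_find_lowest_prio; infer_instance

-- ===== CLAIM (what is proved, stated in full; the proofs are below) =====
def Claim_equal_find_lowest_prio : Prop := ∀ (tokens : List String), Dom_find_lowest_prio tokens → Pre_find_lowest_prio tokens → Spec_find_lowest_prio tokens (find_lowest_prio tokens)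

-- ===== LEMMAS AND PROOFS =====

-- reverse balance: #')' - #'('  (A's fold counter increases by this along the reversed scan)
def rbal (l : List String) : Int := (l.count ")" : Int) - (l.count "(" : Int)

-- candidates of B's forward scan: (index, prio) of operators at depth 0
def fcands (i d : Int) : List String → List (Int × Int)
  | [] => []
  | t :: l =>
    if t == "(" then fcands (i + 1) (d + 1) l
    else if t == ")" then fcands (i + 1) (d - 1) l
    else
      match get_operator_prio t with
      | some p => (if d = 0 then [(i, p)] else []) ++ fcands (i + 1) d l
      | none => fcands (i + 1) d l

-- candidates of A's reversed scan: (reversed index, prio) of operators at fold 0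
def rcands (j f : Int) : List String → List (Int × Int)
  | [] => []
  | t :: l =>
    let f2 := if t == ")" then f + 1 else if t == "(" then f - 1 else f
    (match get_operator_prio t with
     | some p => if f2 = 0 then [(j, p)] else []
     | none => []) ++ rcands (j + 1) f2 l

-- A's selection loop, abstracted: strict-improvement scan
def selA (p nn : Int) : List (Int × Int) → Int × Int
  | [] => (p, nn)
  | c :: l => if c.2 < p then selA c.2 c.1 l else selA p nn l

-- right-to-left strict best (prefers the rightmost element on prio ties; m is rightmost of all)
def bestOf (F : List (Int × Int)) (m : Int × Int) : Int × Int :=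
  match F with
  | [] => m
  | c :: F2 => if c.2 < (bestOf F2 m).2 then c else bestOf F2 m

def keyLt (x m : Int × Int) : Bool :=
  decide (x.2 < m.2) || !decide (m.2 < x.2) && decide (-x.1 < -m.1)

def mstep (acc : Option (Int × Int)) (x : Int × Int) : Option (Int × Int) :=
  match acc with
  | none => some x
  | some m => if keyLt x m then some x else some m

lemma min2?_eq_foldl (F : List (Int × Int)) :
    PySem.List.min2? F (fun c => c.2) (fun c => -c.1) = F.foldl mstep none := by
  simp only [PySem.List.min2?]
  congr 1
  funext acc x
  cases acc <;> rfl

lemma keyLt_trans {a b c : Int × Int} (h1 : keyLt a b) (h2 : keyLt b c) : keyLt a c = true := by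
  simp only [keyLt, Bool.or_eq_true, decide_eq_true_eq, Bool.and_eq_true, Bool.not_eq_eq_eq_not,
    Bool.not_true, decide_eq_false_iff_not] at * ; omega

lemma keyLt_asymm_total {a b c : Int × Int} (h1 : keyLt a b = false) (h2 : keyLt b c = false) :
    keyLt a c = false := by
  simp only [keyLt, Bool.or_eq_false_iff, decide_eq_false_iff_not, Bool.and_eq_false_iff,
    Bool.not_eq_eq_eq_not, Bool.not_false, decide_eq_true_eq] at * ; omega

lemma mfold_from (F : List (Int × Int)) : ∀ (c : Int × Int),
    F.foldl mstep (some c) =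
      some (match F.foldl mstep none with
            | none => c
            | some d => if keyLt d c then d else c) := by
  induction F with
  | nil => intro c; simp
  | cons x F ih =>
    intro c
    have hx := ih x
    have hc := ih (if keyLt x c then x else c)
    simp only [List.foldl_cons, mstep]
    rw [show (if keyLt x c then some x else some c) = some (if keyLt x c then x else c) by
          by_cases h : keyLt x c <;> simp [h]]
    rw [hc, hx]
    rcases h : F.foldl mstep none with _ | e
    · simp
    · simp only []
      by_cases h1 : keyLt x c <;> by_cases h2 : keyLt e x <;> simp [h1, h2]
      · by_cases h3 : keyLt e c <;> simp [h3]
        · exact absurd (keyLt_trans h2 h1) (by simp [h3])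
      · by_cases h3 : keyLt e c <;> simp [h3]
        · exact absurd h3 (by
            rw [keyLt_asymm_total (Bool.not_eq_true _ |>.mp h2) (Bool.not_eq_true _ |>.mp h1)]
            simp)

lemma min2?_mem (F : List (Int × Int)) : ∀ (d : Int × Int),
    PySem.List.min2? F (fun c => c.2) (fun c => -c.1) = some d → d ∈ F := by
  induction F with
  | nil => intro d h; simp [PySem.List.min2?] at h
  | cons x F ih =>
    intro d h
    rw [min2?_eq_foldl, List.foldl_cons] at h
    simp only [mstep] at h
    rw [mfold_from, ← min2?_eq_foldl] at h
    rcases he : PySem.List.min2? F (fun c => c.2) (fun c => -c.1) with _ | e <;>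
      rw [he] at h <;> simp only [] at h
    · simp at h; simp [h]
    · by_cases h2 : keyLt e x <;> simp [h2] at h
      · exact List.mem_cons_of_mem _ (h ▸ ih e he)
      · simp [h]


lemma rbal_cons (t : String) (l : List String) :
    rbal (t :: l) = (if t == ")" then 1 else if t == "(" then -1 else 0) + rbal l := by
  simp only [rbal, List.count_cons]
  by_cases h1 : t == ")" <;> by_cases h2 : t == "(" <;> simp_all [beq_iff_eq] <;> omega
lemma bal_cons (t : String) (l : List String) :
    pvBal (t :: l) = (if t == "(" then 1 else if t == ")" then -1 else 0) + pvBal l := by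
  simp only [pvBal, List.count_cons]
  by_cases h1 : t == ")" <;> by_cases h2 : t == "(" <;> simp_all [beq_iff_eq] <;> omega

lemma op_not_bracket {t : String} {p : Int} (h : get_operator_prio t = some p) :
    (t == "(") = false ∧ (t == ")") = false := by
  simp only [get_operator_prio] at h
  split_ifs at h with h1 h2 h3 <;> simp_all [beq_iff_eq]


lemma bal_single (t : String) :
    pvBal [t] = (if t == "(" then 1 else if t == ")" then -1 else 0) := by
  rw [show ([t] : List String) = t :: [] from rfl, bal_cons]; simp [pvBal]

lemma rbal_single (t : String) :
    rbal [t] = (if t == ")" then 1 else if t == "(" then -1 else 0) := by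
  rw [show ([t] : List String) = t :: [] from rfl, rbal_cons]; simp [rbal]

lemma lemB1 (l : List String) : ∀ (i d : Int) (cs : List (Int × Int)),
    (∀ k : Nat, k ≤ l.length → 0 ≤ d + pvBal (l.take k)) →
    (PySem.List.enumerate l i).foldl stepB (some (d, cs)) =
      some (d + pvBal l, cs ++ fcands i d l) := by
  induction l with
  | nil => intro i d cs _; simp [PySem.List.enumerate, pvBal, fcands]
  | cons t l ih =>
    intro i d cs h
    rw [PySem.List.enumerate_cons, List.foldl_cons]
    have h1 := h 1 (by simp)
    rw [show (t :: l).take 1 = [t] by simp] at h1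
    have hrest : ∀ k : Nat, k ≤ l.length →
        0 ≤ (d + pvBal [t]) + pvBal (l.take k) := by
      intro k hk
      have h2 := h (k + 1) (by simp; omega)
      rw [show (t :: l).take (k+1) = t :: l.take k from rfl, bal_cons] at h2
      rw [← bal_single t] at h2; omega
    have hbal : pvBal (t :: l) = pvBal [t] + pvBal l := by
      rw [bal_cons, bal_single]
    by_cases hp1 : t == "("
    · have hs : pvBal [t] = 1 := by rw [bal_single, hp1]; simp
      have hstep : stepB (some (d, cs)) (i, t) = some (d + 1, cs) := by simp [stepB, hp1]
      rw [hstep, ih (i+1) (d+1) cs (by intro k hk; have := hrest k hk; omega)]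
      have : d + 1 + pvBal l = d + pvBal (t :: l) := by rw [hbal]; omega
      rw [this]
      simp only [fcands, hp1, if_true]
    · have hb1 : (t == "(") = false := by simpa using hp1
      by_cases hp2 : t == ")"
      · have hs : pvBal [t] = -1 := by rw [bal_single, hp2, hb1]; simp
        have hstep : stepB (some (d, cs)) (i, t) = some (d - 1, cs) := by
          simp only [stepB, hb1, hp2, if_false, if_true, Bool.false_eq_true]
          rw [if_neg (by omega)]
        rw [hstep, ih (i+1) (d-1) cs (by intro k hk; have := hrest k hk; omega)]
        have : d - 1 + pvBal l = d + pvBal (t :: l) := by rw [hbal]; omega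
        rw [this]
        simp only [fcands, hb1, hp2, if_true, if_false, Bool.false_eq_true]
      · have hb2 : (t == ")") = false := by simpa using hp2
        have hs : pvBal [t] = 0 := by rw [bal_single, hb1, hb2]; simp
        have hbal' : d + pvBal (t :: l) = d + pvBal l := by rw [hbal]; omega
        rcases hop : get_operator_prio t with _ | p
        · have hstep : stepB (some (d, cs)) (i, t) = some (d, cs) := by
            simp [stepB, hb1, hb2, hop]
          rw [hstep, ih (i+1) d cs (by intro k hk; have := hrest k hk; omega), hbal']
          simp only [fcands, hb1, hb2, if_false, hop, Bool.false_eq_true]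
        · have hstep : stepB (some (d, cs)) (i, t) =
              some (d, cs ++ (if d = 0 then [(i, p)] else [])) := by
            simp only [stepB, hb1, hb2, hop, if_false, Bool.false_eq_true]
            by_cases hd : d = 0 <;> simp [hd]
          rw [hstep, ih (i+1) d _ (by intro k hk; have := hrest k hk; omega), hbal']
          simp only [fcands, hb1, hb2, if_false, hop, List.append_assoc, Bool.false_eq_true]

lemma lemA1 (r : List String) : ∀ (j f p nn : Int),
    (∀ k : Nat, k ≤ r.length → 0 ≤ f + rbal (r.take k)) →
    (PySem.List.enumerate r j).foldl stepA (some (f, p, nn, 0)) =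
      some (f + rbal r, (selA p nn (rcands j f r)).1, (selA p nn (rcands j f r)).2, 0) := by
  induction r with
  | nil => intro j f p nn _; simp [PySem.List.enumerate, rbal, rcands, selA]
  | cons t l ih =>
    intro j f p nn h
    rw [PySem.List.enumerate_cons, List.foldl_cons]
    have h1 := h 1 (by simp)
    rw [show (t :: l).take 1 = [t] by simp] at h1
    have hrest : ∀ k : Nat, k ≤ l.length →
        0 ≤ (f + rbal [t]) + rbal (l.take k) := by
      intro k hk
      have h2 := h (k + 1) (by simp; omega)
      rw [show (t :: l).take (k+1) = t :: l.take k from rfl, rbal_cons] at h2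
      rw [← rbal_single t] at h2; omega
    have hbal : rbal (t :: l) = rbal [t] + rbal l := by rw [rbal_cons, rbal_single]
    -- the fold counter after processing t is f + rbal [t]
    have hf' : (if t == ")" then f + 1 else if t == "(" then f - 1 else f) = f + rbal [t] := by
      rw [rbal_single]
      by_cases hp1 : t == ")" <;> by_cases hp2 : t == "(" <;> simp [hp1, hp2] <;> omega
    have hnneg : ¬ (if t == ")" then f + 1 else if t == "(" then f - 1 else f) < 0 := by
      rw [hf']; omega
    rcases hop : get_operator_prio t with _ | q
    · have hstep : stepA (some (f, p, nn, 0)) (j, t) = some (f + rbal [t], p, nn, 0) := by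
        simp only [stepA, hf', is_operator, hop]
        rw [if_neg (by rw [← hf']; exact hnneg)]
        simp
      rw [hstep, ih (j+1) (f + rbal [t]) p nn hrest]
      have : rcands j f (t :: l) = rcands (j+1) (f + rbal [t]) l := by
        simp only [rcands, hop, hf']
        simp
      rw [this, hbal]
      ring_nf
    · have hnotbr := op_not_bracket hop
      have hs : rbal [t] = 0 := by rw [rbal_single, hnotbr.1, hnotbr.2]; simp
      have hf0 : (if t == ")" then f + 1 else if t == "(" then f - 1 else f) = f := by
        rw [hf', hs]; omega
      have hrc : rcands j f (t :: l) =
          (if f = 0 then [(j, q)] else []) ++ rcands (j+1) f l := by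
        simp only [rcands, hop, hf0]
      have hf0' : 0 ≤ f := by rw [hs] at h1; omega
      by_cases hf00 : f = 0
      · have hstep : stepA (some (f, p, nn, 0)) (j, t) =
            some (f, (if q < p then (q, j) else (p, nn)).1, (if q < p then (q, j) else (p, nn)).2, 0) := by
          subst hf00
          by_cases hq : q < p <;>
            simp [stepA, hnotbr.1, hnotbr.2, is_operator, hop, hq]
        rw [hstep]
        by_cases hq : q < p
        · rw [show ((if q < p then (q, j) else (p, nn)).1 = q) by simp [hq],
              show ((if q < p then (q, j) else (p, nn)).2 = j) by simp [hq]]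
          rw [ih (j+1) f q j (by rw [hs] at hrest; simpa using hrest)]
          rw [hrc, hf00]
          simp only [if_true, List.singleton_append, selA, show ((j : Int), q).2 = q from rfl]
          rw [if_pos hq, hbal, hs]
          ring_nf
        · rw [show ((if q < p then (q, j) else (p, nn)).1 = p) by simp [hq],
              show ((if q < p then (q, j) else (p, nn)).2 = nn) by simp [hq]]
          rw [ih (j+1) f p nn (by rw [hs] at hrest; simpa using hrest)]
          rw [hrc, hf00]
          simp only [if_true, List.singleton_append, selA]
          rw [if_neg hq, hbal, hs]
          ring_nf
      · have hstep : stepA (some (f, p, nn, 0)) (j, t) = some (f, p, nn, 0) := by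
          simp [stepA, hnotbr.1, hnotbr.2, is_operator, hop,
            show ¬ (f < 0) by omega, show ¬ (f ≤ 0) by omega]
        rw [hstep, ih (j+1) f p nn (by rw [hs] at hrest; simpa using hrest)]
        rw [hrc, if_neg hf00, hbal, hs]
        simp only [List.nil_append]
        ring_nf

lemma rcands_append (a : List String) : ∀ (b : List String) (j f : Int),
    rcands j f (a ++ b) = rcands j f a ++ rcands (j + a.length) (f + rbal a) b := by
  induction a with
  | nil => intro b j f; simp [rcands, rbal]
  | cons t a ih =>
    intro b j f
    have hone : rbal (t :: a) = rbal [t] + rbal a := by rw [rbal_cons, rbal_single]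
    have hf' : (if t == ")" then f + 1 else if t == "(" then f - 1 else f) = f + rbal [t] := by
      rw [rbal_single]
      by_cases hp1 : t == ")" <;> by_cases hp2 : t == "(" <;> simp [hp1, hp2] <;> omega
    simp only [List.cons_append, rcands, hf', ih, hone, List.append_assoc]
    have h1 : (j + 1) + (a.length : Int) = j + ((t :: a).length : Int) := by
      simp; omega
    have h2 : f + rbal [t] + rbal a = f + (rbal [t] + rbal a) := by ring
    rw [h1, h2]

lemma lemD (l : List String) : ∀ (j f i d : Int), f = d + pvBal l →
    rcands j f l.reverse =
      ((fcands i d l).map (fun c => (j + (i + l.length - 1) - c.1, c.2))).reverse := by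
  induction l with
  | nil => intro j f i d _; simp [rcands, fcands]
  | cons t l ih =>
    intro j f i d hf
    have hbal1 : pvBal [t] = (if t == "(" then 1 else if t == ")" then -1 else 0) := bal_single t
    have hrb : rbal l.reverse = - pvBal l := by
      simp only [rbal, pvBal, List.count_reverse]; ring
    rw [show (t :: l).reverse = l.reverse ++ [t] by simp, rcands_append]
    have hlen : (l.reverse.length : Int) = l.length := by simp
    by_cases hp1 : t == "("
    · have htail : rcands (j + l.reverse.length) (f + rbal l.reverse) [t] = [] := by
        simp only [rcands]
        have : get_operator_prio t = none := by
          simp [get_operator_prio, show t = "(" by simpa [beq_iff_eq] using hp1]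
        simp [this]
      rw [htail, List.append_nil]
      have hf2 : f = (d + 1) + pvBal l := by
        rw [hf, bal_cons, hp1]; simp; ring
      rw [ih j f (i+1) (d+1) hf2]
      simp only [fcands, hp1, if_true]
      congr 1
      apply List.map_congr_left
      intro c _
      have : j + (i + 1 + (l.length : Int) - 1) = j + (i + ((t :: l).length : Int) - 1) := by
        simp; omega
      rw [this]
    · have hb1 : (t == "(") = false := by simpa using hp1
      by_cases hp2 : t == ")"
      · have htail : rcands (j + l.reverse.length) (f + rbal l.reverse) [t] = [] := by
          simp only [rcands]
          have : get_operator_prio t = none := by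
            simp [get_operator_prio, show t = ")" by simpa [beq_iff_eq] using hp2]
          simp [this]
        rw [htail, List.append_nil]
        have hf2 : f = (d - 1) + pvBal l := by
          rw [hf, bal_cons, hb1, hp2]; simp; ring
        rw [ih j f (i+1) (d-1) hf2]
        simp only [fcands, hb1, hp2, if_true, if_false, Bool.false_eq_true]
        congr 1
        apply List.map_congr_left
        intro c _
        have : j + (i + 1 + (l.length : Int) - 1) = j + (i + ((t :: l).length : Int) - 1) := by
          simp; omega
        rw [this]
      · have hb2 : (t == ")") = false := by simpa using hp2
        have hf2 : f = d + pvBal l := by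
          rw [hf, bal_cons, hb1, hb2]; simp
        have hftail : f + rbal l.reverse = d := by rw [hf2, hrb]; ring
        rcases hop : get_operator_prio t with _ | q
        · have htail : rcands (j + l.reverse.length) (f + rbal l.reverse) [t] = [] := by
            simp only [rcands]
            simp [hop]
          rw [htail, List.append_nil, ih j f (i+1) d hf2]
          simp only [fcands, hb1, hb2, if_false, hop, Bool.false_eq_true]
          congr 1
          apply List.map_congr_left
          intro c _
          have : j + (i + 1 + (l.length : Int) - 1) = j + (i + ((t :: l).length : Int) - 1) := by
            simp; omega
          rw [this]
        · have htail : rcands (j + l.reverse.length) (f + rbal l.reverse) [t] =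
              (if d = 0 then [(j + l.length, q)] else []) := by
            simp only [rcands, hb1, hb2, if_false, Bool.false_eq_true, hop, hftail, hlen]
            simp
          rw [htail, ih j f (i+1) d hf2]
          simp only [fcands, hb1, hb2, if_false, hop, Bool.false_eq_true, List.map_append,
            List.reverse_append]
          congr 1
          · apply congrArg
            apply List.map_congr_left
            intro c _
            have : j + (i + 1 + (l.length : Int) - 1) = j + (i + ((t :: l).length : Int) - 1) := by
              simp; omega
            rw [this]
          · by_cases hd : d = 0 <;> simp [hd]
            omega

lemma fcands_mem (l : List String) : ∀ (i d : Int) (c : Int × Int),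
    c ∈ fcands i d l → i ≤ c.1 ∧ c.1 < i + l.length ∧ 0 ≤ c.2 ∧ c.2 ≤ 2 := by
  induction l with
  | nil => intro i d c hc; simp [fcands] at hc
  | cons t l ih =>
    intro i d c hc
    have hlen : ((t :: l).length : Int) = l.length + 1 := by simp
    simp only [fcands] at hc
    split_ifs at hc with h1 h2 h3
    · have := ih (i+1) (d+1) c hc; rw [hlen]; omega
    · have := ih (i+1) (d-1) c hc; rw [hlen]; omega
    · rcases hop : get_operator_prio t with _ | q <;> rw [hop] at hc
      · have := ih (i+1) d c hc; rw [hlen]; omega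
      · have hq1 : 0 ≤ q ∧ q ≤ 2 := by
          simp only [get_operator_prio] at hop
          split_ifs at hop <;> simp at hop <;> omega
        rcases List.mem_append.mp hc with hc1 | hc2
        · simp at hc1; rw [hc1, hlen]; simp; omega
        · have := ih (i+1) d c hc2; rw [hlen]; omega
    · rcases hop : get_operator_prio t with _ | q <;> rw [hop] at hc
      · have := ih (i+1) d c hc; rw [hlen]; omega
      · simp only [List.nil_append] at hc
        have := ih (i+1) d c hc; rw [hlen]; omega

lemma fcands_pairwise (l : List String) : ∀ (i d : Int),
    (fcands i d l).Pairwise (fun a b => a.1 < b.1) := by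
  induction l with
  | nil => intro i d; simp [fcands]
  | cons t l ih =>
    intro i d
    simp only [fcands]
    split_ifs with h1 h2 h3
    · exact ih (i+1) (d+1)
    · exact ih (i+1) (d-1)
    · rcases hop : get_operator_prio t with _ | q
      · exact ih (i+1) d
      · exact List.Pairwise.cons
          (fun b hb => by have := fcands_mem l (i+1) d b hb; omega) (ih (i+1) d)
    · rcases hop : get_operator_prio t with _ | q
      · exact ih (i+1) d
      · exact ih (i+1) d

lemma selA_append (a : List (Int × Int)) : ∀ (b : List (Int × Int)) (p nn : Int),
    selA p nn (a ++ b) = selA (selA p nn a).1 (selA p nn a).2 b := by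
  induction a with
  | nil => intro b p nn; simp [selA]
  | cons c a ih => intro b p nn; by_cases h : c.2 < p <;> simp [selA, h, ih]

lemma lemS (n : Int) (F : List (Int × Int)) : ∀ (m : Int × Int),
    selA m.2 (n - 1 - m.1) ((F.map (fun c => (n - 1 - c.1, c.2))).reverse) =
      ((bestOf F m).2, n - 1 - (bestOf F m).1) := by
  induction F with
  | nil => intro m; simp [selA, bestOf]
  | cons c F ih =>
    intro m
    simp only [List.map_cons, List.reverse_cons, selA_append, ih, bestOf]
    by_cases h : c.2 < (bestOf F m).2 <;> simp [selA, h]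
lemma lemR (F : List (Int × Int)) : ∀ (m : Int × Int),
    F.Pairwise (fun a b => a.1 < b.1) →
    (∀ c ∈ F, c.2 < m.2 ∧ c.1 < m.1) →
    bestOf F m = (match PySem.List.min2? F (fun c => c.2) (fun c => -c.1) with
                  | none => m
                  | some d => d) := by
  induction F with
  | nil => intro m _ _; simp [bestOf, PySem.List.min2?]
  | cons c F ih =>
    intro m hpw hlt
    have hb' := ih m (List.pairwise_cons.mp hpw).2 (fun d hd => hlt d (List.mem_cons_of_mem _ hd))
    rw [min2?_eq_foldl, List.foldl_cons]
    simp only [mstep]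
    rw [mfold_from, ← min2?_eq_foldl]
    rcases he : PySem.List.min2? F (fun c => c.2) (fun c => -c.1) with _ | e <;>
      rw [he] at hb' <;> simp only [] at hb' ⊢
    · simp only [bestOf, hb']
      have := (hlt c (List.mem_cons_self)).1
      simp [show c.2 < m.2 from this]
    · have hmem := min2?_mem F e he
      have hidx : c.1 < e.1 := (List.pairwise_cons.mp hpw).1 e hmem
      simp only [bestOf, hb']
      have hk : keyLt e c = (decide (e.2 ≤ c.2)) := by
        simp only [keyLt]
        by_cases h1 : e.2 ≤ c.2 <;> simp [h1] <;> omega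
      by_cases h2 : c.2 < e.2
      · simp [h2, hk, show ¬ e.2 ≤ c.2 by omega]
      · simp [h2, hk, show e.2 ≤ c.2 by omega]

-- ===== VERDICT (by name: the statement is the Claim_ definition above) =====
theorem find_lowest_prio_spec : Claim_equal_find_lowest_prio := by
  intro tokens _ hpre
  obtain ⟨hpref, htot⟩ := hpre
  unfold Spec_find_lowest_prio
  have hsplit : ∀ m : Nat, pvBal (tokens.take m) + pvBal (tokens.drop m) = pvBal tokens := by
    intro m
    have h1 : (tokens.take m).count "(" + (tokens.drop m).count "(" = tokens.count "(" := by
      rw [← List.count_append, List.take_append_drop]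
    have h2 : (tokens.take m).count ")" + (tokens.drop m).count ")" = tokens.count ")" := by
      rw [← List.count_append, List.take_append_drop]
    simp only [pvBal]; omega
  have hrbrev : ∀ k : Nat, k ≤ tokens.reverse.length → 0 ≤ (0:Int) + rbal (tokens.reverse.take k) := by
    intro k hk
    rw [List.length_reverse] at hk
    have htr : tokens.reverse.take k = (tokens.drop (tokens.length - k)).reverse :=
      List.take_reverse
    have hcnt : rbal (tokens.reverse.take k) = - pvBal (tokens.drop (tokens.length - k)) := by
      rw [htr]; simp only [rbal, pvBal, List.count_reverse]; omega
    have hps := hsplit (tokens.length - k)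
    have hpf := hpref (tokens.length - k) (by omega)
    omega
  have hA := lemA1 tokens.reverse 0 0 99 (-1) hrbrev
  have hrbtot : rbal tokens.reverse = 0 := by
    simp only [rbal, List.count_reverse]
    simp only [pvBal] at htot; omega
  have hAval : find_lowest_prio tokens =
      (tokens.length : Int) - (selA 99 (-1) (rcands 0 0 tokens.reverse)).2 - 1 := by
    simp only [find_lowest_prio, hA, hrbtot]
    norm_num
  have hBpre : ∀ k : Nat, k ≤ tokens.length → 0 ≤ (0:Int) + pvBal (tokens.take k) := by
    intro k hk; have := hpref k (by omega); omega
  have hB := lemB1 tokens 0 0 [] hBpre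
  have hBval : find_lowest_prio_alt tokens =
      (match PySem.List.min2? (fcands 0 0 tokens) (fun c => c.2) (fun c => -c.1) with
       | none => (tokens.length : Int)
       | some c => c.1) := by
    simp only [find_lowest_prio_alt, hB, htot, List.nil_append]
    norm_num
  have hD := lemD tokens 0 0 0 0 (by omega)
  have hfun : (fun c : Int × Int => ((0:Int) + (0 + (tokens.length : Int) - 1) - c.1, c.2)) =
      (fun c : Int × Int => ((tokens.length : Int) - 1 - c.1, c.2)) := by
    funext c; simp
  rw [hfun] at hD
  have hS := lemS (tokens.length : Int) (fcands 0 0 tokens) (((tokens.length : Int)), 99)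
  rw [show (tokens.length : Int) - 1 - (((tokens.length : Int)), (99:Int)).1 = -1 by simp] at hS
  have hlr := lemR (fcands 0 0 tokens) (((tokens.length : Int)), 99) (fcands_pairwise tokens 0 0)
    (fun c hc => by have := fcands_mem tokens 0 0 c hc; simp; omega)
  rw [hAval, hBval, hD, hS, hlr]
  rcases hmin : PySem.List.min2? (fcands 0 0 tokens) (fun c => c.2) (fun c => -c.1) with _ | c <;>
    simp only [] <;> ring_nf
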